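-- pv_equiv track=rewrite | github.com/jlee0810/Leetcode-Collection | 1537-maximum-score-after-splitting-a-string/1537-maximum-score-after-splitting-a-string.py | maxScore
-- ===== SOURCE A (Python) =====
-- def maxScore(s: str) -> int:
--     zero_count = [0] * (len(s) - 1)
--     one_count = [0] * (len(s) - 1)
--
--     for i in range(len(s) - 1):
--         if s[i] == '0':
--             zero_count[i] = zero_count[i - 1] + 1
--         else:
--             zero_count[i] = zero_count[i - 1]
--
--     s = s[::-1]
--
--     for i in range(len(s) - 1):
--         if s[i] == '1':
--             one_count[i] = one_count[i - 1] + 1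
--         else:
--             one_count[i] = one_count[i - 1]
--     one_count = one_count[::-1]
--
--     max_score = 0
--     for i in range(len(s) - 1):
--         max_score = max(max_score, zero_count[i] + one_count[i])
--
--     return max_score
-- ===== SOURCE B (Python) =====
-- def maxScore(s: str) -> int:
--     ones = 0
--     for c in s:
--         if c == '1':
--             ones += 1
--     zeros = 0
--     best = 0
--     for i in range(len(s) - 1):
--         if s[i] == '1':
--             ones -= 1
--         elif s[i] == '0':
--             zeros += 1
--         best = max(best, zeros + ones)
--     return best
-- ===== Notes on version B (the rewrite author's own statement) =====
-- stated objective: simpler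
-- what changed: B replaces A's two auxiliary prefix-zero/suffix-one count arrays, the two string/array reversals and the final max pass by a single left-to-right pass holding two running counters (zeros seen, ones remaining) and a running best.
import Mathlib
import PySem

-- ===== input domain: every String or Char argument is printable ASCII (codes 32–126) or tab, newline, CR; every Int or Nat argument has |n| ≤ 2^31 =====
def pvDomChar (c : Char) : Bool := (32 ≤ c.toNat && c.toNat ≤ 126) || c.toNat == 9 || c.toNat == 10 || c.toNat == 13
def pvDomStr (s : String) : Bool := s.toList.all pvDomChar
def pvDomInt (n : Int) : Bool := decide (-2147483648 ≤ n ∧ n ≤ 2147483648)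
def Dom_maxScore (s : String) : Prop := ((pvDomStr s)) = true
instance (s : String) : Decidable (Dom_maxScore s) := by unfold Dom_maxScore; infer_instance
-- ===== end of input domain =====

-- B computes the same split score in one pass with two running counters (no count arrays, no reversals): simpler.


-- ===== PORT A =====
-- A-side helper: the body of both array-filling loops (arr[i] = arr[i-1] (+1 if l[i]==c));
-- pyGetD/pySetD are exact for the in-range and the i-1 = -1 (Python wraparound) accesses A makes.
def fillStep (l : List Char) (c : Char) (arr : List Int) (i : Int) : List Int :=
  if PySem.List.pyGetD l i ' ' == c then
    PySem.List.pySetD arr i (PySem.List.pyGetD arr (i - 1) 0 + 1)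
  else
    PySem.List.pySetD arr i (PySem.List.pyGetD arr (i - 1) 0)

def maxScore (s : String) : Int :=
  let cs := s.toList
  let n : Int := cs.length
  let zero_count : List Int := List.replicate (n - 1).toNat 0
  let one_count : List Int := List.replicate (n - 1).toNat 0
  let zero_count := (PySem.List.pyRange 0 (n - 1) 1).foldl (fillStep cs '0') zero_count
  let cs2 := (PySem.List.slice? cs none none (-1)).getD []
  let one_count := (PySem.List.pyRange 0 (n - 1) 1).foldl (fillStep cs2 '1') one_count
  let one_count := (PySem.List.slice? one_count none none (-1)).getD []
  (PySem.List.pyRange 0 (n - 1) 1).foldl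
    (fun m i => max m (PySem.List.pyGetD zero_count i 0 + PySem.List.pyGetD one_count i 0)) 0

-- ===== PORT B =====
def maxScore_alt (s : String) : Int :=
  let cs := s.toList
  let ones : Int := cs.foldl (fun a c => if c == '1' then a + 1 else a) 0
  let st := (PySem.List.pyRange 0 ((cs.length : Int) - 1) 1).foldl
    (fun (st : Int × Int × Int) i =>
      let c := PySem.List.pyGetD cs i ' '
      let oz := if c == '1' then (st.1 - 1, st.2.1)
                else if c == '0' then (st.1, st.2.1 + 1)
                else (st.1, st.2.1)
      (oz.1, oz.2, max st.2.2 (oz.2 + oz.1)))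
    (ones, 0, 0)
  st.2.2

-- ===== PRECONDITION & SPEC =====
def Spec_maxScore (s : String) (out : Int) : Prop := out = maxScore_alt s
instance (s : String) (out : Int) : Decidable (Spec_maxScore s out) := by unfold Spec_maxScore; infer_instance

-- ===== CLAIM (what is proved, stated in full; the proofs are below) =====
def Claim_equal_maxScore : Prop := ∀ (s : String), Dom_maxScore s → Spec_maxScore s (maxScore s)

-- ===== LEMMAS AND PROOFS =====

-- score of split point k: zeros in cs[0..k] plus ones in cs[k+1..]
def splitScore (cs : List Char) (k : Nat) : Int :=
  ((cs.take (k + 1)).countP (· == '0') : Int) + ((cs.drop (k + 1)).countP (· == '1') : Int)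

theorem fill_inv (l : List Char) (c : Char) (m : Nat) (hm : m + 1 = l.length)
    (j : Nat) (hj : j ≤ m) :
    ((PySem.List.pyRange 0 (j : Int) 1).foldl (fillStep l c) (List.replicate m 0)).length = m ∧
    (∀ k, k < j →
      ((PySem.List.pyRange 0 (j : Int) 1).foldl (fillStep l c) (List.replicate m 0)).getD k 0
        = ((l.take (k + 1)).countP (· == c) : Int)) ∧
    (∀ k, j ≤ k → k < m →
      ((PySem.List.pyRange 0 (j : Int) 1).foldl (fillStep l c) (List.replicate m 0)).getD k 0 = 0) := by
  induction j with
  | zero =>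
    simp only [Nat.cast_zero, PySem.List.pyRange_one_eq_nil (le_refl (0:Int)), List.foldl_nil]
    refine ⟨by simp, by simp, ?_⟩
    intro k _ hk
    simp [List.getD_eq_getElem?_getD, hk]
  | succ j ih =>
    have hjm : j < m := hj
    obtain ⟨ihlen, ihlt, ihge⟩ := ih (Nat.le_of_lt hjm)
    set arr := (PySem.List.pyRange 0 (j : Int) 1).foldl (fillStep l c) (List.replicate m 0) with harr
    have hrange : PySem.List.pyRange 0 ((j+1 : Nat) : Int) 1
        = PySem.List.pyRange 0 (j : Int) 1 ++ [(j : Int)] := by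
      push_cast
      exact PySem.List.pyRange_one_succ_right (by exact_mod_cast Nat.zero_le j)
    rw [hrange, List.foldl_append]
    simp only [List.foldl_cons, List.foldl_nil]
    -- previous value arr[j-1] (wraparound for j = 0)
    have hprev : PySem.List.pyGetD arr ((j : Int) - 1) 0 = ((l.take j).countP (· == c) : Int) := by
      cases j with
      | zero =>
        have hne : arr ≠ [] := by
          intro h; rw [h] at ihlen; simp at ihlen; omega
        rw [show ((0 : Nat) : Int) - 1 = -1 by norm_num,
            PySem.List.pyGetD_neg_one arr 0 hne]
        have := ihge (m - 1) (by omega) (by omega)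
        rw [List.getLast_eq_getElem]
        rw [List.getD_eq_getElem?_getD] at this
        simp only [ihlen] at *
        rw [List.getElem?_eq_getElem (by omega)] at this
        simpa using this
      | succ k =>
        rw [show (((k+1 : Nat)) : Int) - 1 = (k : Int) by push_cast; ring,
            PySem.List.pyGetD_natCast]
        exact ihlt k (by omega)
    have hstep : fillStep l c arr (j : Int)
        = arr.set j (((l.take (j+1)).countP (· == c) : Int)) := by
      have hjl : j < l.length := by omega
      have hchar : PySem.List.pyGetD l (j : Int) ' ' = l[j] := by
        simp [PySem.List.pyGetD_natCast, List.getD_eq_getElem?_getD, List.getElem?_eq_getElem hjl]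
      have htake : (l.take (j+1)).countP (· == c)
          = (l.take j).countP (· == c) + (if l[j] = c then 1 else 0) := by
        rw [List.take_add_one, List.getElem?_eq_getElem hjl,
            show (some l[j]).toList = [l[j]] from rfl, List.countP_append]
        by_cases hc : l[j] = c
        · simp [hc]
        · simp [hc]
      unfold fillStep
      rw [hchar, hprev]
      by_cases hc : l[j] = c
      · rw [if_pos (by simpa using hc), PySem.List.pySetD_natCast]
        congr 1
        rw [htake, if_pos hc]
        push_cast
        ring
      · rw [if_neg (by simpa using hc), PySem.List.pySetD_natCast]
        congr 1
        rw [htake, if_neg hc]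
        push_cast
        ring
    rw [hstep]
    refine ⟨by simp [ihlen], ?_, ?_⟩
    · intro k hk
      rcases Nat.lt_succ_iff_lt_or_eq.mp hk with h | h
      · rw [List.getD_eq_getElem?_getD, List.getElem?_set, if_neg (by omega),
            ← List.getD_eq_getElem?_getD]
        exact ihlt k h
      · subst h
        rw [List.getD_eq_getElem?_getD, List.getElem?_set]
        simp [ihlen, hjm]
    · intro k hk1 hk2
      have := ihge k (by omega) hk2
      rw [List.getD_eq_getElem?_getD, List.getElem?_set, if_neg (by omega)]
      rw [List.getD_eq_getElem?_getD] at this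
      exact this

theorem maxScore_eq_fold (s : String) :
    maxScore s = (PySem.List.pyRange 0 ((s.toList.length : Int) - 1) 1).foldl
      (fun a i => max a (splitScore s.toList i.toNat)) 0 := by
  unfold maxScore
  rcases h : s.toList with _ | ⟨c0, cs'⟩
  · simp [PySem.List.pyRange_one_eq_nil (by norm_num : (-1 : Int) ≤ 0)]
  · rw [← h]
    set cs := s.toList with hcs
    have hlen : cs.length = cs'.length + 1 := by rw [h]; simp
    set m := cs'.length with hmdef
    have hm : m + 1 = cs.length := by omega
    have hcast : ((cs.length : Int) - 1) = (m : Int) := by omega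
    simp only [hcast, PySem.List.slice?_none_none_neg_one, Option.getD_some,
      Int.toNat_natCast]
    obtain ⟨hzlen, hzlt, -⟩ := fill_inv cs '0' m hm m le_rfl
    obtain ⟨holen, holt, -⟩ := fill_inv cs.reverse '1' m (by simpa using hm) m le_rfl
    set zc := (PySem.List.pyRange 0 (m : Int) 1).foldl (fillStep cs '0') (List.replicate m 0) with hzc
    set oc := (PySem.List.pyRange 0 (m : Int) 1).foldl (fillStep cs.reverse '1') (List.replicate m 0) with hoc
    apply PySem.List.foldl_congr_mem
    intro acc i hi
    obtain ⟨hi0, him⟩ := PySem.List.mem_pyRange_one.mp hi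
    obtain ⟨k, rfl⟩ : ∃ k : Nat, i = (k : Int) := ⟨i.toNat, (Int.toNat_of_nonneg hi0).symm⟩
    have hk : k < m := by exact_mod_cast him
    congr 1
    have h1 : PySem.List.pyGetD zc (k : Int) 0 = ((cs.take (k + 1)).countP (· == '0') : Int) := by
      rw [PySem.List.pyGetD_natCast]; exact hzlt k hk
    have hocr : oc.reverse.getD k 0 = ((cs.drop (k + 1)).countP (· == '1') : Int) := by
      rw [List.getD_eq_getElem?_getD, List.getElem?_reverse (by omega : k < oc.length),
          show oc.length - 1 - k = m - 1 - k by omega,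
          ← List.getD_eq_getElem?_getD, holt (m - 1 - k) (by omega),
          show m - 1 - k + 1 = m - k by omega]
      rw [List.take_reverse, List.countP_reverse,
          show cs.length - (m - k) = k + 1 by omega]
    have h2 : PySem.List.pyGetD oc.reverse (k : Int) 0 = ((cs.drop (k + 1)).countP (· == '1') : Int) := by
      rw [PySem.List.pyGetD_natCast]; exact hocr
    rw [h1, h2, splitScore, Int.toNat_natCast]

theorem alt_inv (cs : List Char) (m : Nat) (hm : m + 1 = cs.length) (j : Nat) (hj : j ≤ m) :
    ((PySem.List.pyRange 0 (j : Int) 1).foldl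
      (fun (st : Int × Int × Int) i =>
        let c := PySem.List.pyGetD cs i ' '
        let oz := if c == '1' then (st.1 - 1, st.2.1)
                  else if c == '0' then (st.1, st.2.1 + 1)
                  else (st.1, st.2.1)
        (oz.1, oz.2, max st.2.2 (oz.2 + oz.1)))
      (((cs.countP (· == '1')) : Int), 0, 0))
    = (((cs.drop j).countP (· == '1') : Int), ((cs.take j).countP (· == '0') : Int),
       (PySem.List.pyRange 0 (j : Int) 1).foldl (fun a i => max a (splitScore cs i.toNat)) 0) := by
  induction j with
  | zero =>
    simp [PySem.List.pyRange_one_eq_nil (le_refl (0:Int))]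
  | succ j ih =>
    have hjm : j < m := hj
    have hjl : j < cs.length := by omega
    have hrange : PySem.List.pyRange 0 ((j+1 : Nat) : Int) 1
        = PySem.List.pyRange 0 (j : Int) 1 ++ [(j : Int)] := by
      push_cast
      exact PySem.List.pyRange_one_succ_right (by exact_mod_cast Nat.zero_le j)
    rw [hrange, List.foldl_append, List.foldl_append, ih (Nat.le_of_lt hjm)]
    simp only [List.foldl_cons, List.foldl_nil]
    have hchar : PySem.List.pyGetD cs (j : Int) ' ' = cs[j] := by
      simp [PySem.List.pyGetD_natCast, List.getD_eq_getElem?_getD, List.getElem?_eq_getElem hjl]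
    have hdrop : (cs.drop j).countP (· == '1')
        = (if cs[j] = '1' then 1 else 0) + (cs.drop (j+1)).countP (· == '1') := by
      rw [List.drop_eq_getElem_cons hjl, List.countP_cons]
      by_cases hc : cs[j] = '1' <;> simp [hc] <;> omega
    have htake : (cs.take (j+1)).countP (· == '0')
        = (cs.take j).countP (· == '0') + (if cs[j] = '0' then 1 else 0) := by
      rw [List.take_add_one, List.getElem?_eq_getElem hjl,
          show (some cs[j]).toList = [cs[j]] from rfl, List.countP_append]
      by_cases hc : cs[j] = '0' <;> simp [hc]
    rw [hchar]
    by_cases hc1 : cs[j] = '1'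
    · refine Prod.ext ?_ (Prod.ext ?_ ?_) <;>
        simp [splitScore, hdrop, htake, hc1] <;> push_cast <;> omega
    · by_cases hc0 : cs[j] = '0'
      · refine Prod.ext ?_ (Prod.ext ?_ ?_) <;>
          simp [splitScore, hdrop, htake, hc1, hc0] <;> push_cast <;> omega
      · refine Prod.ext ?_ (Prod.ext ?_ ?_) <;>
          simp [splitScore, hdrop, htake, hc1, hc0] <;> push_cast <;> omega

theorem maxScore_alt_eq_fold (s : String) :
    maxScore_alt s = (PySem.List.pyRange 0 ((s.toList.length : Int) - 1) 1).foldl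
      (fun a i => max a (splitScore s.toList i.toNat)) 0 := by
  unfold maxScore_alt
  rcases h : s.toList with _ | ⟨c0, cs'⟩
  · simp [PySem.List.pyRange_one_eq_nil (by norm_num : (-1 : Int) ≤ 0)]
  · rw [← h]
    set cs := s.toList with hcs
    have hm : cs'.length + 1 = cs.length := by rw [h]; simp
    have hcast : ((cs.length : Int) - 1) = (cs'.length : Int) := by omega
    have hones : cs.foldl (fun a c => if c == '1' then a + 1 else a) 0
        = ((cs.countP (· == '1')) : Int) := by
      rw [PySem.List.foldl_if_add_one]; ring
    simp only [hcast, hones]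
    rw [alt_inv cs cs'.length hm cs'.length le_rfl]

-- ===== VERDICT (by name: the statement is the Claim_ definition above) =====
theorem maxScore_spec : Claim_equal_maxScore := by
  intro s _
  unfold Spec_maxScore
  rw [maxScore_eq_fold, maxScore_alt_eq_fold]
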